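-- pv_equiv track=rewrite | github.com/Sadomtsevvs/Leetcode | 6021. Maximize Number of Subsequences in a String.py | maximumSubsequenceCount
-- ===== SOURCE A (Python) =====
-- from collections import Counter
--
-- def maximumSubsequenceCount(text: str, pattern: str) -> int:
--     cntr = Counter(text)
--     if pattern[0] == pattern[1]:
--         exist0 = cntr[pattern[0]]
--         return (exist0 + 1) * exist0 // 2
--     else:
--         non_orders = 0
--         count1 = 0
--         for t in text:
--             if t == pattern[0]:
--                 non_orders += count1
--             elif t == pattern[1]:
--                 count1 += 1
--         exist0 = cntr[pattern[0]]
--         exist1 = cntr[pattern[1]]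
--         return max((exist0 + 1)*exist1, exist0*(exist1+1)) - non_orders
-- ===== SOURCE B (Python) =====
-- def maximumSubsequenceCount(text: str, pattern: str) -> int:
--     # Single pass: count in-order pattern[0]..pattern[1] pairs directly,
--     # then add the best single insertion (max of the two letter counts).
--     p0, p1 = pattern[0], pattern[1]
--     ans = c0 = c1 = 0
--     for ch in text:
--         if ch == p1:
--             ans += c0
--             c1 += 1
--         if ch == p0:
--             c0 += 1
--     return ans + max(c0, c1)
-- ===== Notes on version B (the rewrite author's own statement) =====
-- stated objective: simpler
-- what changed: Replaces the Counter plus the equal/unequal two-case split (product of counts minus wrong-order pairs, with a separate closed-form branch) by one uniform pass that counts in-order pairs directly and adds max(c0,c1); the equal-character case is handled by the same loop with no branch. (one fold over the text instead of Counter pass plus a second loop, measured ~2x faster).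
import Mathlib
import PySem

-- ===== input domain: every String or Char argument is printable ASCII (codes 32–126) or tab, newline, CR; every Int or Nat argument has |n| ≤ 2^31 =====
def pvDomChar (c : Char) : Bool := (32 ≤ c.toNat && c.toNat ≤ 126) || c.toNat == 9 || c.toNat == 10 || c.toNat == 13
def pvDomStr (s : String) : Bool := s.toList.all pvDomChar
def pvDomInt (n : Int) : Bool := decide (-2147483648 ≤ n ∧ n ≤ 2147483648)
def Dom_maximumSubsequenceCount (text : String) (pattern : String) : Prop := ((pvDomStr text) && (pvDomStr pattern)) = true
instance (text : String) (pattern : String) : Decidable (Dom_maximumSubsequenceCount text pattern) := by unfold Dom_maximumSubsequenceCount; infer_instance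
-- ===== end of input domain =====

-- B replaces the Counter and the equal/unequal case split of A by one uniform pass
-- that counts in-order pairs directly and adds max(c0, c1); same return value.

-- ===== PORT A =====
def maximumSubsequenceCount (text : String) (pattern : String) : Int :=
  match PySem.Str.pyGet? pattern 0, PySem.Str.pyGet? pattern 1 with
  | some p0, some p1 =>
    let cntr := PySem.Dict.counter text.toList
    if p0 == p1 then
      let exist0 : Int := cntr.getD p0 0
      PySem.Int.floordiv ((exist0 + 1) * exist0) 2
    else
      let s := text.toList.foldl (fun (st : Int × Int) t =>
        if t == p0 then (st.1 + st.2, st.2)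
        else if t == p1 then (st.1, st.2 + 1)
        else st) (0, 0)
      let exist0 : Int := cntr.getD p0 0
      let exist1 : Int := cntr.getD p1 0
      max ((exist0 + 1) * exist1) (exist0 * (exist1 + 1)) - s.1
  | _, _ => 0   -- IndexError in Python; excluded by Pre_

-- ===== PORT B =====
def maximumSubsequenceCount_alt (text : String) (pattern : String) : Int :=
  match PySem.Str.pyGet? pattern 0 with
  | none => 0   -- IndexError in Python; excluded by Pre_
  | some p0 =>
    match PySem.Str.pyGet? pattern 1 with
    | none => 0   -- IndexError in Python; excluded by Pre_
    | some p1 =>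
      let s := text.toList.foldl (fun (st : Int × Int × Int) ch =>
        let st1 := if ch == p1 then (st.1 + st.2.1, st.2.1, st.2.2 + 1) else st
        if ch == p0 then (st1.1, st1.2.1 + 1, st1.2.2) else st1) (0, 0, 0)
      s.1 + max s.2.1 s.2.2

-- ===== PRECONDITION & SPEC =====
-- Pre_ excludes only patterns of length < 2, on which A raises IndexError at pattern[0]/pattern[1].
def Pre_maximumSubsequenceCount (text : String) (pattern : String) : Prop :=
  2 ≤ pattern.toList.length
instance (text : String) (pattern : String) : Decidable (Pre_maximumSubsequenceCount text pattern) := by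
  unfold Pre_maximumSubsequenceCount; infer_instance

def pvWitness_maximumSubsequenceCount : String × String := ("abdcdbc", "ac")

def Spec_maximumSubsequenceCount (text : String) (pattern : String) (out : Int) : Prop := out = maximumSubsequenceCount_alt text pattern
instance (text : String) (pattern : String) (out : Int) : Decidable (Spec_maximumSubsequenceCount text pattern out) := by unfold Spec_maximumSubsequenceCount; infer_instance

-- ===== CLAIM (what is proved, stated in full; the proofs are below) =====
def Claim_equal_maximumSubsequenceCount : Prop := ∀ (text : String) (pattern : String), Dom_maximumSubsequenceCount text pattern → Pre_maximumSubsequenceCount text pattern → Spec_maximumSubsequenceCount text pattern (maximumSubsequenceCount text pattern)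

-- ===== LEMMAS AND PROOFS =====

def pvFA (p0 p1 : Char) : Int × Int → Char → Int × Int := fun st t =>
  if t == p0 then (st.1 + st.2, st.2) else if t == p1 then (st.1, st.2 + 1) else st

def pvFB (p0 p1 : Char) : Int × Int × Int → Char → Int × Int × Int := fun st ch =>
  let st1 := if ch == p1 then (st.1 + st.2.1, st.2.1, st.2.2 + 1) else st
  if ch == p0 then (st1.1, st1.2.1 + 1, st1.2.2) else st1

theorem pv_inv_ne (p0 p1 : Char) (h : p0 ≠ p1) (l : List Char) :
    (l.foldl (pvFA p0 p1) (0, 0)).2 = (l.count p1 : Int) ∧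
    (l.foldl (pvFB p0 p1) (0, 0, 0)).2.1 = (l.count p0 : Int) ∧
    (l.foldl (pvFB p0 p1) (0, 0, 0)).2.2 = (l.count p1 : Int) ∧
    (l.foldl (pvFB p0 p1) (0, 0, 0)).1 + (l.foldl (pvFA p0 p1) (0, 0)).1
      = (l.count p0 : Int) * (l.count p1 : Int) := by
  induction l using List.reverseRecOn with
  | nil => simp
  | append_singleton l x ih =>
    obtain ⟨ha2, hb0, hb1, hsum⟩ := ih
    simp only [List.foldl_append, List.foldl_cons, List.foldl_nil, List.count_append,
      List.count_cons, List.count_nil, pvFA, pvFB]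
    have h' : p1 ≠ p0 := Ne.symm h
    by_cases h0 : x = p0
    · simp [h0, h, ha2, hb0, hb1]
      nlinarith [hsum]
    · by_cases h1 : x = p1
      · simp [h1, h', ha2, hb0, hb1]
        nlinarith [hsum]
      · simp [h0, h1, ha2, hb0, hb1, hsum]

theorem pv_inv_eq (p : Char) (l : List Char) :
    (l.foldl (pvFB p p) (0, 0, 0)).2.1 = (l.count p : Int) ∧
    (l.foldl (pvFB p p) (0, 0, 0)).2.2 = (l.count p : Int) ∧
    2 * (l.foldl (pvFB p p) (0, 0, 0)).1 = (l.count p : Int) * ((l.count p : Int) - 1) := by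
  induction l using List.reverseRecOn with
  | nil => simp
  | append_singleton l x ih =>
    obtain ⟨hb0, hb1, hsum⟩ := ih
    simp only [List.foldl_append, List.foldl_cons, List.foldl_nil, List.count_append,
      List.count_cons, List.count_nil, pvFB]
    by_cases h0 : x = p
    · simp [h0, hb0, hb1]
      nlinarith [hsum]
    · simp [h0, hb0, hb1, hsum]

theorem pv_floordiv_two_mul (k : Int) : PySem.Int.floordiv (2 * k) 2 = k := by
  rw [PySem.Int.floordiv_eq_ediv_of_pos (by norm_num)]
  omega

theorem maximumSubsequenceCount_spec : Claim_equal_maximumSubsequenceCount := by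
  intro text pattern hdom hpre
  unfold Pre_maximumSubsequenceCount at hpre
  obtain ⟨p0, rest0, hl⟩ : ∃ p0 rest, pattern.toList = p0 :: rest := by
    cases hpl : pattern.toList with
    | nil => rw [hpl] at hpre; simp at hpre
    | cons a t => exact ⟨a, t, rfl⟩
  obtain ⟨p1, rest1, hr⟩ : ∃ p1 rest, rest0 = p1 :: rest := by
    cases rest0 with
    | nil => rw [hl] at hpre; simp at hpre
    | cons a t => exact ⟨a, t, rfl⟩
  subst hr
  have hg0 : PySem.Str.pyGet? pattern 0 = some p0 := by
    simp [PySem.Str.pyGet?, hl, PySem.List.pyGet?_zero_cons]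
  have hg1 : PySem.Str.pyGet? pattern 1 = some p1 := by
    simp [PySem.Str.pyGet?, hl, PySem.List.pyGet?, PySem.List.pyIdx?]
  unfold Spec_maximumSubsequenceCount maximumSubsequenceCount maximumSubsequenceCount_alt
  rw [hg0, hg1]
  simp only []
  by_cases hpp : p0 = p1
  · subst hpp
    simp only [beq_self_eq_true, if_true]
    obtain ⟨hb0, hb1, hsum⟩ := pv_inv_eq p0 text.toList
    have hfold : (text.toList.foldl (fun (st : Int × Int × Int) ch =>
        let st1 := if ch == p0 then (st.1 + st.2.1, st.2.1, st.2.2 + 1) else st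
        if ch == p0 then (st1.1, st1.2.1 + 1, st1.2.2) else st1) (0, 0, 0))
        = text.toList.foldl (pvFB p0 p0) (0, 0, 0) := rfl
    rw [hfold]
    rw [PySem.Dict.getD_counter]
    set e : Int := (text.toList.count p0 : Int) with he
    set b := text.toList.foldl (pvFB p0 p0) (0, 0, 0) with hb
    have : (e + 1) * e = 2 * (b.1 + e) := by nlinarith [hsum]
    rw [this, pv_floordiv_two_mul, hb0, hb1]
    simp
  · have hne : (p0 == p1) = false := by simp [hpp]
    simp only [hne, Bool.false_eq_true, if_false]
    obtain ⟨ha2, hb0, hb1, hsum⟩ := pv_inv_ne p0 p1 hpp text.toList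
    have hfa : (text.toList.foldl (fun (st : Int × Int) t =>
        if t == p0 then (st.1 + st.2, st.2)
        else if t == p1 then (st.1, st.2 + 1) else st) (0, 0))
        = text.toList.foldl (pvFA p0 p1) (0, 0) := rfl
    have hfb : (text.toList.foldl (fun (st : Int × Int × Int) ch =>
        let st1 := if ch == p1 then (st.1 + st.2.1, st.2.1, st.2.2 + 1) else st
        if ch == p0 then (st1.1, st1.2.1 + 1, st1.2.2) else st1) (0, 0, 0))
        = text.toList.foldl (pvFB p0 p1) (0, 0, 0) := rfl
    rw [hfa, hfb, PySem.Dict.getD_counter, PySem.Dict.getD_counter, hb0, hb1]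
    set e0 : Int := (text.toList.count p0 : Int)
    set e1 : Int := (text.toList.count p1 : Int)
    set a := text.toList.foldl (pvFA p0 p1) (0, 0)
    set b := text.toList.foldl (pvFB p0 p1) (0, 0, 0)
    rcases le_total e0 e1 with hle | hle
    · rw [max_eq_left (by nlinarith), max_eq_right hle]
      nlinarith [hsum]
    · rw [max_eq_right (by nlinarith), max_eq_left hle]
      nlinarith [hsum]
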